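-- pv_equiv track=rewrite | github.com/yolain/ComfyUI-Easy-Use | py/nodes/logic.py | validate_list_args
-- ===== SOURCE A (Python) =====
-- from typing import Iterator, List, Tuple, Dict, Any, Union, Optional
--
-- def validate_list_args(args: Dict[str, List[Any]]) -> Tuple[bool, None, None]:
--     if len(args) == 1:
--         return True, None, None
--     len_to_match = None
--     matched_arg_name = None
--     for arg_name, arg in args.items():
--         if arg_name == "self":
--             continue
--         if len(arg) != 1:
--             if len_to_match is None:
--                 len_to_match = len(arg)
--                 matched_arg_name = arg_name
--             elif len(arg) != len_to_match:
--                 return False, arg_name, matched_arg_name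
--     return True, None, None
-- ===== SOURCE B (Python) =====
-- def validate_list_args(args):
--     groups = {}
--     for arg_name, arg in args.items():
--         if arg_name != "self" and len(arg) != 1:
--             groups.setdefault(len(arg), []).append(arg_name)
--     if len(groups) <= 1:
--         return True, None, None
--     lengths = list(groups)
--     return False, groups[lengths[1]][0], groups[lengths[0]][0]
-- ===== Notes on version B (the rewrite author's own statement) =====
-- stated objective: alternative
-- what changed: Instead of streaming with two Optional accumulators and an early return, B groups argument names by list length in an insertion-ordered dict (excluding 'self' and unit-length lists): at most one group means valid, otherwise the offender is the first name of the second group and the baseline the first name of the first group.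
import Mathlib
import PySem

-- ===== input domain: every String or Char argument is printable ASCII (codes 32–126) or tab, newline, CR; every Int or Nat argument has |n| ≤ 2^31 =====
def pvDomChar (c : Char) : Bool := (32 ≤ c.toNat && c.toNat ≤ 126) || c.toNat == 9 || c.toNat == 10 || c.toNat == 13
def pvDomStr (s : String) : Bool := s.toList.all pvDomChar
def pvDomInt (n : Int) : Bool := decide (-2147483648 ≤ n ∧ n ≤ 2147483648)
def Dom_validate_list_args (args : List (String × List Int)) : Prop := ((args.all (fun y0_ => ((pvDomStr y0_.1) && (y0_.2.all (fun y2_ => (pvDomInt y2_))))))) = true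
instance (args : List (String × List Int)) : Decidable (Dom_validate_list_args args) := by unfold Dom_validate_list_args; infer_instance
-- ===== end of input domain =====

-- B replaces A's stateful scan (two Optional accumulators, early return) by grouping names by
-- list length in an insertion-ordered dict and reading the first two groups (objective: alternative).

-- ===== PORT A =====
def pvLoopA : List (String × List Int) → Option Int → Option String → Bool × Option String × Option String
  | [], _, _ => (true, none, none)
  | (name, arg) :: rest, len_to_match, matched_arg_name =>
    if name == "self" then pvLoopA rest len_to_match matched_arg_name
    else if (arg.length : Int) ≠ 1 then
      match len_to_match with
      | none => pvLoopA rest (some (arg.length : Int)) (some name)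
      | some l =>
        if (arg.length : Int) ≠ l then (false, some name, matched_arg_name)
        else pvLoopA rest len_to_match matched_arg_name
    else pvLoopA rest len_to_match matched_arg_name

def validate_list_args (args : List (String × List Int)) : Bool × Option String × Option String :=
  if args.length = 1 then (true, none, none)
  else pvLoopA args none none

-- ===== PORT B =====
-- groups.setdefault(len(arg), []).append(arg_name)  ==  modify (len) [] (· ++ [name])
def pvGroupsB (args : List (String × List Int)) : PySem.Dict Int (List String) :=
  args.foldl
    (fun d p =>
      if p.1 ≠ "self" ∧ (p.2.length : Int) ≠ 1 then
        d.modify (p.2.length : Int) [] (· ++ [p.1])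
      else d)
    PySem.Dict.empty

-- 'if len(groups) <= 1: True' and 'groups[lengths[1]][0] / groups[lengths[0]][0]' read off the
-- items list; head? is exact here since every group list is nonempty by construction.
def pvReadB (d : PySem.Dict Int (List String)) : Bool × Option String × Option String :=
  match d.items with
  | (_, g0) :: (_, g1) :: _ => (false, g1.head?, g0.head?)
  | _ => (true, none, none)

def validate_list_args_alt (args : List (String × List Int)) : Bool × Option String × Option String :=
  pvReadB (pvGroupsB args)

-- ===== PRECONDITION & SPEC =====
def Spec_validate_list_args (args : List (String × List Int)) (out : Bool × Option String × Option String) : Prop := out = validate_list_args_alt args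
instance (args : List (String × List Int)) (out : Bool × Option String × Option String) : Decidable (Spec_validate_list_args args out) := by unfold Spec_validate_list_args; infer_instance

-- ===== CLAIM (what is proved, stated in full; the proofs are below) =====
def Claim_equal_validate_list_args : Prop := ∀ (args : List (String × List Int)), Dom_validate_list_args args → Spec_validate_list_args args (validate_list_args args)

-- ===== LEMMAS AND PROOFS =====

-- the relevant (length, name) pairs, in order
def pvRel (args : List (String × List Int)) : List (Int × String) :=
  (args.filter (fun p => p.1 ≠ "self" ∧ (p.2.length : Int) ≠ 1)).map
    (fun p => ((p.2.length : Int), p.1))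

def pvScan : List (Int × String) → Int → String → Bool × Option String × Option String
  | [], _, _ => (true, none, none)
  | (l, n) :: rest, l0, n0 =>
    if l ≠ l0 then (false, some n, some n0) else pvScan rest l0 n0

def pvStep (d : PySem.Dict Int (List String)) (p : Int × String) : PySem.Dict Int (List String) :=
  d.modify p.1 [] (· ++ [p.2])

lemma pvGroupsB_eq_rel (args : List (String × List Int)) (d : PySem.Dict Int (List String)) :
    args.foldl
      (fun d p =>
        if p.1 ≠ "self" ∧ (p.2.length : Int) ≠ 1 then
          d.modify (p.2.length : Int) [] (· ++ [p.1])
        else d) d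
    = (pvRel args).foldl pvStep d := by
  induction args generalizing d with
  | nil => simp [pvRel]
  | cons p rest ih =>
    obtain ⟨name, arg⟩ := p
    by_cases hs : name = "self"
    · simp only [List.foldl_cons]
      rw [if_neg (by simp [hs])]
      rw [ih, show pvRel ((name, arg) :: rest) = pvRel rest by simp [pvRel, List.filter, hs]]
    · by_cases h1 : (arg.length : Int) = 1
      · simp only [List.foldl_cons]
        rw [if_neg (by simp [h1])]
        rw [ih, show pvRel ((name, arg) :: rest) = pvRel rest by
          simp [pvRel, List.filter, show arg.length = 1 from by exact_mod_cast h1]]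
      · have h1n : arg.length ≠ 1 := fun h => h1 (by simp [h])
        simp only [List.foldl_cons]
        rw [if_pos (And.intro hs h1)]
        rw [ih, show pvRel ((name, arg) :: rest)
            = ((arg.length : Int), name) :: pvRel rest from by
          simp [pvRel, List.filter, hs, h1n]]
        rfl

lemma pvLoopA_some (args : List (String × List Int)) (l : Int) (m : String) :
    pvLoopA args (some l) (some m) = pvScan (pvRel args) l m := by
  induction args with
  | nil => simp [pvLoopA, pvRel, pvScan]
  | cons p rest ih =>
    obtain ⟨name, arg⟩ := p
    by_cases hs : name = "self"
    · simpa [pvLoopA, pvRel, List.filter, hs] using ih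
    · by_cases h1 : (arg.length : Int) = 1
      · simpa [pvLoopA, pvRel, List.filter, hs, h1] using ih
      · have h1n : arg.length ≠ 1 := fun h => h1 (by simp [h])
        have hfilt : pvRel ((name, arg) :: rest)
            = ((arg.length : Int), name) :: pvRel rest := by
          simp [pvRel, List.filter, hs, h1n]
        by_cases hl : (arg.length : Int) = l
        · simpa [pvLoopA, hs, h1, hl, hfilt, pvScan] using ih
        · simp [pvLoopA, hs, h1, hl, hfilt, pvScan]

-- phase 2: once the dict has two groups, further steps never change the two heads
lemma pvPhase2 (ps : List (Int × String)) :
    ∀ (k0 k1 : Int) (n0 n1 : String) (xs0 xs1 : List String) (restd : List (Int × List String)),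
    k0 ≠ k1 →
    ∃ ys0 ys1 restd',
      ps.foldl pvStep (PySem.Dict.mk ((k0, n0 :: xs0) :: (k1, n1 :: xs1) :: restd))
        = PySem.Dict.mk ((k0, n0 :: ys0) :: (k1, n1 :: ys1) :: restd') := by
  induction ps with
  | nil => exact fun k0 k1 n0 n1 xs0 xs1 restd _ => ⟨xs0, xs1, restd, rfl⟩
  | cons p ps ih =>
    intro k0 k1 n0 n1 xs0 xs1 restd hne
    obtain ⟨k, n⟩ := p
    by_cases h0 : k = k0
    · have : pvStep (PySem.Dict.mk ((k0, n0 :: xs0) :: (k1, n1 :: xs1) :: restd)) (k, n)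
          = PySem.Dict.mk ((k0, n0 :: (xs0 ++ [n])) :: (k1, n1 :: xs1) ::
              restd.map (fun q => if q.1 == k0 then (k0, n0 :: (xs0 ++ [n])) else q)) := by
        subst h0
        simp [pvStep, PySem.Dict.modify, PySem.Dict.insert, PySem.Dict.contains,
          PySem.Dict.getD_eq_get?_getD, PySem.Dict.get?, List.find?, hne.symm]
      rw [List.foldl_cons, this]
      exact ih k0 k1 n0 n1 _ _ _ hne
    · by_cases h1 : k = k1
      · have : pvStep (PySem.Dict.mk ((k0, n0 :: xs0) :: (k1, n1 :: xs1) :: restd)) (k, n)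
            = PySem.Dict.mk ((k0, n0 :: xs0) :: (k1, n1 :: (xs1 ++ [n])) ::
                restd.map (fun q => if q.1 == k1 then (k1, n1 :: (xs1 ++ [n])) else q)) := by
          subst h1
          simp [pvStep, PySem.Dict.modify, PySem.Dict.insert, PySem.Dict.contains,
            PySem.Dict.getD_eq_get?_getD, PySem.Dict.get?_mk_cons, hne]
        rw [List.foldl_cons, this]
        exact ih k0 k1 n0 n1 _ _ _ hne
      · cases hc : (PySem.Dict.mk ((k0, n0 :: xs0) :: (k1, n1 :: xs1) :: restd)).contains k with
        | true =>
          have : pvStep (PySem.Dict.mk ((k0, n0 :: xs0) :: (k1, n1 :: xs1) :: restd)) (k, n)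
              = PySem.Dict.mk ((k0, n0 :: xs0) :: (k1, n1 :: xs1) ::
                  restd.map (fun q => if q.1 == k then
                    (k, ((PySem.Dict.mk ((k0, n0 :: xs0) :: (k1, n1 :: xs1) :: restd)).getD k []) ++ [n]) else q)) := by
            simp [pvStep, PySem.Dict.modify, PySem.Dict.insert, hc, Ne.symm h0, Ne.symm h1]
          rw [List.foldl_cons, this]
          exact ih k0 k1 n0 n1 _ _ _ hne
        | false =>
          have : pvStep (PySem.Dict.mk ((k0, n0 :: xs0) :: (k1, n1 :: xs1) :: restd)) (k, n)
              = PySem.Dict.mk ((k0, n0 :: xs0) :: (k1, n1 :: xs1) :: (restd ++ [(k, [n])])) := by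
            simp [pvStep, PySem.Dict.modify, PySem.Dict.insert, hc,
              PySem.Dict.getD_of_not_contains _ _ hc]
          rw [List.foldl_cons, this]
          exact ih k0 k1 n0 n1 _ _ _ hne

-- phase 1: a single group scans like A's baseline comparison
lemma pvPhase1 (ps : List (Int × String)) :
    ∀ (l0 : Int) (n0 : String) (xs0 : List String),
    pvReadB (ps.foldl pvStep (PySem.Dict.mk [(l0, n0 :: xs0)])) = pvScan ps l0 n0 := by
  induction ps with
  | nil => intro l0 n0 xs0; simp [pvReadB, pvScan]
  | cons p ps ih =>
    intro l0 n0 xs0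
    obtain ⟨l, n⟩ := p
    by_cases hl : l = l0
    · have : pvStep (PySem.Dict.mk [(l0, n0 :: xs0)]) (l, n)
          = PySem.Dict.mk [(l0, n0 :: (xs0 ++ [n]))] := by
        subst hl
        simp [pvStep, PySem.Dict.modify, PySem.Dict.insert, PySem.Dict.contains,
          PySem.Dict.getD_eq_get?_getD, PySem.Dict.get?, List.find?]
      rw [List.foldl_cons, this]
      simpa [pvScan, hl] using ih l0 n0 (xs0 ++ [n])
    · have hstep : pvStep (PySem.Dict.mk [(l0, n0 :: xs0)]) (l, n)
          = PySem.Dict.mk [(l0, n0 :: xs0), (l, n :: [])] := by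
        simp [pvStep, PySem.Dict.modify, PySem.Dict.insert, PySem.Dict.contains,
          PySem.Dict.getD_eq_get?_getD, PySem.Dict.get?_mk_cons, PySem.Dict.get?,
          List.find?, show (l0 == l) = false from beq_eq_false_iff_ne.mpr (Ne.symm hl)]
      rw [List.foldl_cons, hstep]
      obtain ⟨ys0, ys1, restd', hsh⟩ :=
        pvPhase2 ps l0 l n0 n xs0 [] [] (Ne.symm hl)
      simp [hsh, pvReadB, pvScan, hl]

lemma pvAlt_eq (args : List (String × List Int)) :
    validate_list_args_alt args
      = match pvRel args with
        | [] => (true, none, none)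
        | (l0, n0) :: ps => pvScan ps l0 n0 := by
  unfold validate_list_args_alt pvGroupsB
  rw [pvGroupsB_eq_rel]
  cases hrel : pvRel args with
  | nil => simp [pvReadB, PySem.Dict.empty]
  | cons p ps =>
    obtain ⟨l0, n0⟩ := p
    have hfirst : pvStep PySem.Dict.empty (l0, n0) = PySem.Dict.mk [(l0, n0 :: [])] := by
      simp [pvStep, PySem.Dict.modify, PySem.Dict.insert, PySem.Dict.contains,
        PySem.Dict.empty, PySem.Dict.getD_eq_get?_getD, PySem.Dict.get?]
    simp only [List.foldl_cons, hfirst, pvPhase1]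

lemma pvLoopA_none (args : List (String × List Int)) :
    pvLoopA args none none = validate_list_args_alt args := by
  rw [pvAlt_eq]
  induction args with
  | nil => simp [pvLoopA, pvRel]
  | cons p rest ih =>
    obtain ⟨name, arg⟩ := p
    by_cases hs : name = "self"
    · simpa [pvLoopA, pvRel, List.filter, hs] using ih
    · by_cases h1 : (arg.length : Int) = 1
      · simpa [pvLoopA, pvRel, List.filter, hs, h1] using ih
      · have h1n : arg.length ≠ 1 := fun h => h1 (by simp [h])
        have hfilt : pvRel ((name, arg) :: rest)
            = ((arg.length : Int), name) :: pvRel rest := by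
          simp [pvRel, List.filter, hs, h1n]
        simp [pvLoopA, hs, h1, hfilt, pvLoopA_some]

-- ===== VERDICT (by name: the statement is the Claim_ definition above) =====
theorem validate_list_args_spec : Claim_equal_validate_list_args := by
  intro args _
  unfold Spec_validate_list_args validate_list_args
  split
  · next h =>
      match args, h with
      | [(name, arg)], _ =>
        rw [pvAlt_eq]
        by_cases hs : name = "self" <;> by_cases h1 : (arg.length : Int) = 1 <;>
          simp [pvRel, List.filter, pvScan, hs, h1]
  · exact pvLoopA_none args
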